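-- pv_equiv track=rewrite | github.com/mtkumar123/HumanReadableConvertor | main.py | recursive_human_readable_convertor
-- ===== SOURCE A (Python) =====
-- word_mapping = {"S": "Soft", "T": "Tough"}
--
-- def recursive_human_readable_convertor(
--     text: str,
--     iter: int,
--     pos: int = 0,
--     result: str = "",
-- ) -> str:
--     """Recursive function to convert given text
--     into human readable form based on number of
--     iterations required.
--
--     :param str text: pattern of S and T string
--     :param int iter: number of iterations
--     :param int pos: current position in text, defaults to 0
--     :param str result: human readable pattern result, defaults to ""
--     :return str: human readable pattern result
--     """
--     if iter < 1:
--         return result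
--     if iter == 1:
--         if result:
--             result += f" and {word_mapping[text[pos]]}."
--         else:
--             result = f"{word_mapping[text[pos]]}."
--         return result
--     result += (
--         f", {word_mapping[text[pos]]}" if result else word_mapping[text[pos]]
--     )
--     pos = pos + 1 if (pos + 1) < len(text) else 0
--     iter -= 1
--     return recursive_human_readable_convertor(text, iter, pos, result)
-- ===== SOURCE B (Python) =====
-- word_mapping = {"S": "Soft", "T": "Tough"}
--
-- def recursive_human_readable_convertor(
--     text: str,
--     iter: int,
--     pos: int = 0,
--     result: str = "",
-- ) -> str:
--     """Build the whole word list up front with modular indexing,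
--     then assemble the sentence with join instead of recursing."""
--     if iter < 1:
--         return result
--     n = len(text)
--     words = [word_mapping[text[(pos + k) % n]] for k in range(iter)]
--     if iter == 1:
--         body = words[0] + "."
--         return f"{result} and {body}" if result else body
--     head = ", ".join(words[:-1])
--     if result:
--         head = f"{result}, {head}"
--     return f"{head} and {words[-1]}."
-- ===== Notes on version B (the rewrite author's own statement) =====
-- stated objective: idiomatic
-- what changed: Replaces the tail recursion that threads pos/result state with a single up-front list comprehension using modular indexing for the cyclic positions, followed by a ', '.join plus ' and WORD.' assembly of the sentence.
import Mathlib
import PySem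

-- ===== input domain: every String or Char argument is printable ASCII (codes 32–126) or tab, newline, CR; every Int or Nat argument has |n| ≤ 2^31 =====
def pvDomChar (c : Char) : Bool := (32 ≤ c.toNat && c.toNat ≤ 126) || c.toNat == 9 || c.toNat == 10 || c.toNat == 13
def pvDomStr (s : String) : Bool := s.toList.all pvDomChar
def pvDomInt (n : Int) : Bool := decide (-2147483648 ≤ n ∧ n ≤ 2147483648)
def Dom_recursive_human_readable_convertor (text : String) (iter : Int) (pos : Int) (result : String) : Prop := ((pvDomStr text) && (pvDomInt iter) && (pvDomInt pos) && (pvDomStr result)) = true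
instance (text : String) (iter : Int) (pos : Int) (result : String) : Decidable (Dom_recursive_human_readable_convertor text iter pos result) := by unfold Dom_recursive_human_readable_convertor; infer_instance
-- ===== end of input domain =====

-- B replaces A's tail recursion by building the word list up front (modular indexing) and joining it; same values, no speed claim.


-- ===== PORT A =====
-- word_mapping[c] : the module-level dict {"S": "Soft", "T": "Tough"}; none = KeyError
def pvWordMap (c : Char) : Option (List Char) :=
  if c = 'S' then some "Soft".toList
  else if c = 'T' then some "Tough".toList
  else none

-- literal port of A's recursion over List Char ([] at the `none` branches = Python raises there; excluded by Pre_)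
def pvRecA (text : List Char) (iter : Int) (pos : Int) (result : List Char) : List Char :=
  if _h1 : iter < 1 then result
  else if _h2 : iter = 1 then
    match (PySem.List.pyGet? text pos).bind pvWordMap with
    | none => []
    | some w =>
      if result ≠ [] then result ++ " and ".toList ++ w ++ ".".toList
      else w ++ ".".toList
  else
    match (PySem.List.pyGet? text pos).bind pvWordMap with
    | none => []
    | some w =>
      pvRecA text (iter - 1)
        (if pos + 1 < (text.length : Int) then pos + 1 else 0)
        (if result ≠ [] then result ++ ", ".toList ++ w else w)
termination_by iter.toNat
decreasing_by omega

def recursive_human_readable_convertor (text : String) (iter : Int) (pos : Int) (result : String) : String :=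
  String.ofList (pvRecA text.toList iter pos result.toList)

-- ===== PORT B =====
-- word_mapping[text[(pos + k) % n]] for one k (getD [] where Python would raise; excluded by Pre_)
def pvWordAt (text : List Char) (pos : Int) (k : Int) : List Char :=
  ((PySem.List.pyGet? text (PySem.Int.mod (pos + k) (text.length : Int))).bind pvWordMap).getD []

-- the comprehension [word_mapping[text[(pos + k) % n]] for k in range(iter)]
def pvWordsB (text : List Char) (iter : Int) (pos : Int) : List (List Char) :=
  (PySem.List.pyRange 0 iter 1).map (pvWordAt text pos)

def pvRecB (text : List Char) (iter : Int) (pos : Int) (result : List Char) : List Char :=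
  if iter < 1 then result
  else
    let words := pvWordsB text iter pos
    if iter = 1 then
      let body := words.headD [] ++ ".".toList
      if result ≠ [] then result ++ " and ".toList ++ body else body
    else
      let head := PySem.Chars.join ", ".toList words.dropLast
      let head2 := if result ≠ [] then result ++ ", ".toList ++ head else head
      head2 ++ " and ".toList ++ words.getLastD [] ++ ".".toList

def recursive_human_readable_convertor_alt (text : String) (iter : Int) (pos : Int) (result : String) : String :=
  String.ofList (pvRecB text.toList iter pos result.toList)

-- ===== PRECONDITION & SPEC =====
-- 'the character of text at Python index i (cyclically) is S or T'
def pvOkB (text : List Char) (i : Int) : Bool :=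
  text[(i % (text.length : Int)).toNat]? == some 'S' || text[(i % (text.length : Int)).toNat]? == some 'T'

-- A raises unless iter < 1 or: text nonempty, pos a valid Python index, and every position the
-- recursion visits (the first min(iter, len text) cyclic steps from pos) holds 'S' or 'T'.
def Pre_recursive_human_readable_convertor (text : String) (iter : Int) (pos : Int) (_result : String) : Prop :=
  iter < 1 ∨
    (0 < text.toList.length ∧ -(text.toList.length : Int) ≤ pos ∧ pos < (text.toList.length : Int) ∧
     ∀ k : Nat, k < text.toList.length → (k : Int) < iter → pvOkB text.toList (pos + k) = true)
instance (text : String) (iter : Int) (pos : Int) (result : String) : Decidable (Pre_recursive_human_readable_convertor text iter pos result) := by unfold Pre_recursive_human_readable_convertor; infer_instance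

def pvWitness_recursive_human_readable_convertor : String × Int × Int × String := ("ST", 3, 0, "")

def Spec_recursive_human_readable_convertor (text : String) (iter : Int) (pos : Int) (result : String) (out : String) : Prop := out = recursive_human_readable_convertor_alt text iter pos result
instance (text : String) (iter : Int) (pos : Int) (result : String) (out : String) : Decidable (Spec_recursive_human_readable_convertor text iter pos result out) := by unfold Spec_recursive_human_readable_convertor; infer_instance

-- ===== CLAIM (what is proved, stated in full; the proofs are below) =====
def Claim_equal_recursive_human_readable_convertor : Prop := ∀ (text : String) (iter : Int) (pos : Int) (result : String), Dom_recursive_human_readable_convertor text iter pos result → Pre_recursive_human_readable_convertor text iter pos result → Spec_recursive_human_readable_convertor text iter pos result (recursive_human_readable_convertor text iter pos result)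

-- ===== LEMMAS AND PROOFS =====

-- every position the loop visits is 'S' or 'T' (unbounded form, derived from Pre_)
def pvCok (text : List Char) (iter : Int) (pos : Int) : Prop :=
  ∀ k : Int, 0 ≤ k → k < iter → pvOkB text (pos + k) = true

lemma pv_emod_add_emod (p k N : Int) : (p + k) % N = (p + k % N) % N := by
  conv_lhs => rw [← Int.emod_add_mul_ediv k N]
  rw [← Int.add_assoc, Int.add_mul_emod_self_left]

lemma pv_okB_congr (text : List Char) {i j : Int}
    (h : i % (text.length : Int) = j % (text.length : Int)) : pvOkB text i = pvOkB text j := by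
  unfold pvOkB; rw [h]

lemma pv_add_self_emod (N k : Int) : (N + k) % N = k % N := by
  have h := Int.add_mul_emod_self_left (a := k) (b := N) (c := 1)
  rw [mul_one] at h
  rw [Int.add_comm]
  exact h

lemma pv_pre_to_cok (text : List Char) (iter pos : Int)
    (h0 : 0 < text.length)
    (hp : ∀ k : Nat, k < text.length → (k : Int) < iter → pvOkB text (pos + k) = true) :
    pvCok text iter pos := by
  intro k hk0 hki
  have hN : (0 : Int) < (text.length : Int) := by exact_mod_cast h0
  have hm0 : 0 ≤ k % (text.length : Int) := Int.emod_nonneg k (by omega)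
  have hmN : k % (text.length : Int) < (text.length : Int) := Int.emod_lt_of_pos k hN
  have hlt : ((k % (text.length : Int)).toNat : Int) < iter := by
    by_cases hc : (text.length : Int) ≤ iter
    · omega
    · have : k % (text.length : Int) = k := Int.emod_eq_of_lt hk0 (by omega)
      omega
  have h := hp (k % (text.length : Int)).toNat (by omega) hlt
  have hcast : (((k % (text.length : Int)).toNat : Int)) = k % (text.length : Int) := by omega
  rw [pv_okB_congr text (i := pos + k)
      (j := pos + ((k % (text.length : Int)).toNat : Int)) ?_]
  · exact h
  · rw [hcast, ← pv_emod_add_emod]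

lemma pv_shift_emod (N pos : Int) (_h0 : 0 < N) (h2 : pos < N) (k : Int) :
    ((if pos + 1 < N then pos + 1 else 0) + k) % N = (pos + 1 + k) % N := by
  split_ifs with h
  · rfl
  · have hpe : pos + 1 = N := by omega
    rw [hpe, Int.zero_add, pv_add_self_emod]

lemma pv_cok_step (text : List Char) (iter pos : Int)
    (h0 : 0 < text.length) (h2 : pos < (text.length : Int))
    (hc : pvCok text iter pos) :
    pvCok text (iter - 1) (if pos + 1 < (text.length : Int) then pos + 1 else 0) := by
  intro k hk0 hki
  have hN : (0 : Int) < (text.length : Int) := by exact_mod_cast h0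
  have h := hc (1 + k) (by omega) (by omega)
  rw [pv_okB_congr text (i := (if pos + 1 < (text.length : Int) then pos + 1 else 0) + k)
      (j := pos + (1 + k)) ?_]
  · exact h
  · rw [pv_shift_emod _ _ hN h2 k]; ring_nf

lemma pv_pyGet_emod (text : List Char) (p : Int)
    (h0 : 0 < text.length) (h1 : -(text.length : Int) ≤ p) (h2 : p < (text.length : Int)) :
    PySem.List.pyGet? text p = text[(p % (text.length : Int)).toNat]? := by
  by_cases h : 0 ≤ p
  · rw [PySem.List.pyGet?_of_nonneg text h, Int.emod_eq_of_lt h h2]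
  · have hN : (0 : Int) < (text.length : Int) := by exact_mod_cast h0
    have he : p % (text.length : Int) = p + (text.length : Int) := by
      have e1 : (p + (text.length : Int)) % (text.length : Int) = p % (text.length : Int) := by
        rw [Int.add_comm]; exact pv_add_self_emod _ _
      rw [← e1, Int.emod_eq_of_lt (by omega) (by omega)]
    have hk : p = -(((-p).toNat : Int)) := by omega
    have hget : PySem.List.pyGet? text p = text[text.length - (-p).toNat]? := by
      conv_lhs => rw [hk]
      exact PySem.List.pyGet?_neg_natCast text (-p).toNat (by omega) (by omega)
    rw [hget]
    congr 1
    omega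

lemma pv_wordAt_eq (text : List Char) (pos k : Int) (h0 : 0 < text.length) :
    pvWordAt text pos k = (text[((pos + k) % (text.length : Int)).toNat]?.bind pvWordMap).getD [] := by
  have hN : (0 : Int) < (text.length : Int) := by exact_mod_cast h0
  unfold pvWordAt
  rw [PySem.Int.mod_eq_emod_of_pos hN,
      PySem.List.pyGet?_of_nonneg text (Int.emod_nonneg _ (by omega))]

lemma pv_wordAt_congr (text : List Char) (h0 : 0 < text.length) {pos k pos' k' : Int}
    (h : (pos + k) % (text.length : Int) = (pos' + k') % (text.length : Int)) :
    pvWordAt text pos k = pvWordAt text pos' k' := by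
  rw [pv_wordAt_eq _ _ _ h0, pv_wordAt_eq _ _ _ h0, h]

lemma pv_ok_word (text : List Char) (i : Int) (h : pvOkB text i = true) :
    ∃ w, text[(i % (text.length : Int)).toNat]?.bind pvWordMap = some w ∧ w ≠ [] := by
  unfold pvOkB at h
  rcases Bool.or_eq_true_iff.mp h with h' | h' <;> rw [beq_iff_eq] at h'
  · exact ⟨"Soft".toList, by rw [h']; simp [pvWordMap], by decide⟩
  · exact ⟨"Tough".toList, by rw [h']; simp [pvWordMap], by decide⟩

lemma pv_words_len (text : List Char) (iter pos : Int) :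
    (pvWordsB text iter pos).length = iter.toNat := by
  unfold pvWordsB
  rw [List.length_map, PySem.List.length_pyRange_one]
  simp

lemma pv_words_cons (text : List Char) (iter pos : Int)
    (h0 : 0 < text.length) (h2 : pos < (text.length : Int)) (hi : 1 ≤ iter) :
    pvWordsB text iter pos =
      pvWordAt text pos 0 ::
        pvWordsB text (iter - 1) (if pos + 1 < (text.length : Int) then pos + 1 else 0) := by
  have hN : (0 : Int) < (text.length : Int) := by exact_mod_cast h0
  unfold pvWordsB
  rw [PySem.List.pyRange_one_cons (by omega : (0 : Int) < iter)]
  simp only [List.map_cons]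
  congr 1
  rw [PySem.List.pyRange_one, PySem.List.pyRange_one, List.map_map, List.map_map]
  have hlen : (iter - (0 + 1)).toNat = (iter - 1 - 0).toNat := by omega
  rw [hlen]
  apply List.map_congr_left
  intro a _
  show pvWordAt text pos (0 + 1 + (a : Int)) =
       pvWordAt text (if pos + 1 < (text.length : Int) then pos + 1 else 0) (0 + (a : Int))
  refine (pv_wordAt_congr text h0 ?_).symm
  rw [pv_shift_emod _ _ hN h2]
  ring_nf

lemma pv_recB_step (text : List Char) (iter pos : Int) (result w : List Char)
    (h0 : 0 < text.length) (h2 : pos < (text.length : Int)) (hi : 2 ≤ iter)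
    (hw : pvWordAt text pos 0 = w) (hwne : w ≠ []) :
    pvRecB text iter pos result =
      pvRecB text (iter - 1) (if pos + 1 < (text.length : Int) then pos + 1 else 0)
        (if result ≠ [] then result ++ ", ".toList ++ w else w) := by
  have hcons := pv_words_cons text iter pos h0 h2 (by omega)
  rw [hw] at hcons
  set pos' := if pos + 1 < (text.length : Int) then pos + 1 else 0 with hpos'
  have hlen : (pvWordsB text (iter - 1) pos').length = (iter - 1).toNat :=
    pv_words_len text (iter - 1) pos'
  set result' := if result ≠ [] then result ++ ", ".toList ++ w else w with hres'
  have hres'ne : result' ≠ [] := by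
    rw [hres']; split_ifs <;> simp [hwne]
  by_cases h21 : iter = 2
  · subst h21
    obtain ⟨w1, hw1⟩ : ∃ w1, pvWordsB text (2 - 1) pos' = [w1] := by
      match hws : pvWordsB text (2 - 1) pos', hlen with
      | [w1], _ => exact ⟨w1, rfl⟩
    rw [hw1] at hcons
    simp only [pvRecB]
    rw [if_neg (by omega : ¬ (2:Int) < 1), if_neg (by omega : ¬ (2:Int) = 1),
        if_neg (by omega : ¬ (2:Int) - 1 < 1), if_pos (by omega : (2:Int) - 1 = 1)]
    rw [hcons, hw1]
    simp only [List.dropLast, List.getLastD, PySem.Chars.join_singleton, List.headD]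
    split_ifs <;> simp_all [List.append_assoc]
  · -- iter ≥ 3
    obtain ⟨w1, w2, ws'', hw12⟩ : ∃ w1 w2 ws'', pvWordsB text (iter - 1) pos' = w1 :: w2 :: ws'' := by
      match hws : pvWordsB text (iter - 1) pos', hlen with
      | w1 :: w2 :: ws'', _ => exact ⟨w1, w2, ws'', rfl⟩
      | [], hlen => exact absurd hlen (by simp; omega)
      | [w1], hlen => exact absurd hlen (by simp; omega)
    rw [hw12] at hcons
    simp only [pvRecB]
    rw [if_neg (by omega : ¬ iter < 1), if_neg (by omega : ¬ iter = 1),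
        if_neg (by omega : ¬ iter - 1 < 1), if_neg (by omega : ¬ iter - 1 = 1)]
    rw [hcons, hw12]
    rw [show (w :: w1 :: w2 :: ws'').dropLast = w :: w1 :: (w2 :: ws'').dropLast by
          rfl]
    rw [PySem.Chars.join_cons_cons]
    rw [show (w :: w1 :: w2 :: ws'').getLastD [] = (w1 :: w2 :: ws'').getLastD [] by
          simp [List.getLastD]]
    rw [show (w1 :: w2 :: ws'').dropLast = w1 :: (w2 :: ws'').dropLast by
          rfl]
    split_ifs <;> simp_all [List.append_assoc]

lemma pv_rec_eq (text : List Char) (m : Nat) :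
    ∀ (iter pos : Int) (result : List Char),
      iter.toNat ≤ m → 0 < text.length →
      -(text.length : Int) ≤ pos → pos < (text.length : Int) →
      pvCok text iter pos →
      pvRecA text iter pos result = pvRecB text iter pos result := by
  induction m with
  | zero =>
    intro iter pos result hm h0 h1 h2 hc
    have hlt : iter < 1 := by omega
    rw [pvRecA, pvRecB]
    rw [dif_pos hlt, if_pos hlt]
  | succ m ih =>
    intro iter pos result hm h0 h1 h2 hc
    have hN : (0 : Int) < (text.length : Int) := by exact_mod_cast h0
    by_cases hlt : iter < 1
    · rw [pvRecA, pvRecB, dif_pos hlt, if_pos hlt]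
    · have hok0 : pvOkB text pos = true := by
        have := hc 0 le_rfl (by omega)
        rwa [Int.add_zero] at this
      obtain ⟨w, hwbind, hwne⟩ := pv_ok_word text pos hok0
      have hA : (PySem.List.pyGet? text pos).bind pvWordMap = some w := by
        rw [pv_pyGet_emod text pos h0 h1 h2]; exact hwbind
      have hw0 : pvWordAt text pos 0 = w := by
        rw [pv_wordAt_eq _ _ _ h0, Int.add_zero, hwbind]; rfl
      by_cases h1e : iter = 1
      · subst h1e
        rw [pvRecA]
        simp only [dif_neg hlt, hA]
        have hwords : pvWordsB text 1 pos = [pvWordAt text pos 0] := by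
          unfold pvWordsB
          rw [PySem.List.pyRange_one]
          norm_num [List.range_one]
        simp only [pvRecB]
        rw [if_neg hlt]
        rw [dif_pos True.intro, if_pos True.intro, hwords, hw0]
        simp only [List.headD]
        split_ifs <;> simp [List.append_assoc]
      · -- iter ≥ 2
        rw [pvRecA]
        simp only [dif_neg hlt, dif_neg h1e, hA]
        have hb1 : -(text.length : Int) ≤ (if pos + 1 < (text.length : Int) then pos + 1 else 0) := by
          split_ifs <;> omega
        have hb2 : (if pos + 1 < (text.length : Int) then pos + 1 else 0) < (text.length : Int) := by
          split_ifs <;> omega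
        rw [ih (iter - 1) _ _ (by omega) h0 hb1 hb2 (pv_cok_step text iter pos h0 h2 hc)]
        exact (pv_recB_step text iter pos result w h0 h2 (by omega) hw0 hwne).symm

-- ===== VERDICT (by name: the statement is the Claim_ definition above) =====
theorem recursive_human_readable_convertor_spec : Claim_equal_recursive_human_readable_convertor := by
  intro text iter pos result _hDom hPre
  unfold Spec_recursive_human_readable_convertor
  unfold recursive_human_readable_convertor recursive_human_readable_convertor_alt
  rcases hPre with hlt | ⟨h0, h1, h2, hp⟩
  · rw [pvRecA, pvRecB, dif_pos hlt, if_pos hlt]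
  · exact congrArg String.ofList
      (pv_rec_eq text.toList iter.toNat iter pos result.toList le_rfl h0 h1 h2
        (pv_pre_to_cok text.toList iter pos h0 hp))
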